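-- pv_equiv track=rewrite | github.com/ethereum/evmlab | evmlab/contract.py | parseSourceMap
-- ===== SOURCE A (Python) =====
-- def update(original, changes):
--     retval = []
--     for i in range(0, len(original)):
--         val = original[i]
--         if i < len(changes) and len(changes[i]) > 0:
--             val = changes[i]
--         retval.append(val)
--     return retval
--
-- def parseSourceMap(maptext):
--     mapping = []
--
--     if maptext is None:
--         return mapping
--
--     entries = maptext.split(";")
--     m = ["", "", "", ""]
--     for e in entries:
--         vals = e.split(":")
--         m = update(m, vals)
--         mapping.append(m)
--     return mapping
-- ===== SOURCE B (Python) =====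
-- def parseSourceMap(maptext):
--     # Column-wise: forward-fill each of the four fields across all entries, then transpose.
--     if maptext is None:
--         return []
--     entries = [e.split(":") for e in maptext.split(";")]
--     cols = []
--     for i in range(4):
--         cur = ""
--         col = []
--         for vals in entries:
--             if i < len(vals) and len(vals[i]) > 0:
--                 cur = vals[i]
--             col.append(cur)
--         cols.append(col)
--     return [list(row) for row in zip(*cols)]
-- ===== Notes on version B (the rewrite author's own statement) =====
-- stated objective: alternative
-- what changed: B pre-splits all entries once, forward-fills each of the four fields column-wise into four lists, and transposes them into per-entry rows, instead of A's single scan that rebuilds the whole 4-field state with a helper loop at every entry.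
import Mathlib
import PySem

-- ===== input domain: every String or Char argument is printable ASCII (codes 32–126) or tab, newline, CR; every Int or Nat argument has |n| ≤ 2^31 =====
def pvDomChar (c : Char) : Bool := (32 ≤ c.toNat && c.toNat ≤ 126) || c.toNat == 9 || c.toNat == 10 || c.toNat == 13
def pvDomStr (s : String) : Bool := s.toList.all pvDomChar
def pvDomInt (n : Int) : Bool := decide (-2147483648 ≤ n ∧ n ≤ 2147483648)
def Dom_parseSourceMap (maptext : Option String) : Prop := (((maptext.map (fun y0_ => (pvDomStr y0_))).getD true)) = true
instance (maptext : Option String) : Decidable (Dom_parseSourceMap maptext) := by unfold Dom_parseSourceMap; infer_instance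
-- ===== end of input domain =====

-- B pre-splits all entries once, forward-fills each of the four fields column-wise, and transposes;
-- A scans once, rebuilding the whole 4-field state per entry. Objective: alternative decomposition.

-- s.split(sep) for a nonempty literal separator (split? is none only for sep = "")
def splitS (s sep : String) : List String := (PySem.Str.split? s sep).getD []

-- ===== PORT A =====
-- A's helper: update(original, changes) — loop over range(len(original)).
-- original is always in range here (i < len(original)), so .getD "" never takes its default.
def updateA (original changes : List String) : List String :=
  (PySem.List.pyRange 0 original.length 1).foldl (fun retval i =>
    let val := (PySem.List.pyGet? original i).getD ""
    let val := if i < (changes.length : Int) ∧ PySem.Str.len ((PySem.List.pyGet? changes i).getD "") > 0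
               then (PySem.List.pyGet? changes i).getD "" else val
    retval ++ [val]) []

def parseSourceMap (maptext : Option String) : List (List String) :=
  match maptext with
  | none => []
  | some s =>
    let entries := splitS s ";"
    (entries.foldl (fun (st : List String × List (List String)) e =>
        let vals := splitS e ":"
        let m := updateA st.1 vals
        (m, st.2 ++ [m])) ((["", "", "", ""] : List String), [])).2

-- ===== PORT B =====
-- one cell of a column: take field i of vals if present and nonempty, else keep cur
def cellB (vals : List String) (i : Nat) (cur : String) : String :=
  match vals[i]? with
  | some v => if PySem.Str.len v > 0 then v else cur
  | none => cur

-- forward-fill column i across all (pre-split) entries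
def fillB (i : Nat) (cur : String) : List (List String) → List String
  | [] => []
  | vals :: rest =>
    let cur' := cellB vals i cur
    cur' :: fillB i cur' rest

-- zip(*cols) for four columns (equal lengths here)
def zip4B : List String → List String → List String → List String → List (List String)
  | a :: as_, b :: bs, c :: cs, d :: ds => [a, b, c, d] :: zip4B as_ bs cs ds
  | _, _, _, _ => []

def parseSourceMap_alt (maptext : Option String) : List (List String) :=
  match maptext with
  | none => []
  | some s =>
    let entries := (splitS s ";").map
      (fun e => splitS e ":")
    zip4B (fillB 0 "" entries) (fillB 1 "" entries) (fillB 2 "" entries) (fillB 3 "" entries)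

-- ===== PRECONDITION & SPEC =====
def Spec_parseSourceMap (maptext : Option String) (out : List (List String)) : Prop := out = parseSourceMap_alt maptext
instance (maptext : Option String) (out : List (List String)) : Decidable (Spec_parseSourceMap maptext out) := by unfold Spec_parseSourceMap; infer_instance

-- ===== CLAIM (what is proved, stated in full; the proofs are below) =====
def Claim_equal_parseSourceMap : Prop := ∀ (maptext : Option String), Dom_parseSourceMap maptext → Spec_parseSourceMap maptext (parseSourceMap maptext)

-- ===== LEMMAS AND PROOFS =====

-- field-presence test of A's update = one cell of B
theorem cell_bridge (vals : List String) (n : Nat) (cur : String) :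
    (if ((n : Int) < (vals.length : Int) ∧ PySem.Str.len ((PySem.List.pyGet? vals (n : Int)).getD "") > 0)
     then (PySem.List.pyGet? vals (n : Int)).getD "" else cur) = cellB vals n cur := by
  rw [PySem.List.pyGet?_natCast]
  cases h : vals[n]? with
  | none => simp [cellB, h, PySem.Str.len]
  | some v =>
    obtain ⟨hn, hv⟩ := List.getElem?_eq_some_iff.mp h
    simp [cellB, hn, hv]

-- A's per-entry state update = the four cells of B, component-wise
theorem updateA_eq (a b c d : String) (vals : List String) :
    updateA [a, b, c, d] vals
      = [cellB vals 0 a, cellB vals 1 b, cellB vals 2 c, cellB vals 3 d] := by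
  have c0 := cell_bridge vals 0 a
  have c1 := cell_bridge vals 1 b
  have c2 := cell_bridge vals 2 c
  have c3 := cell_bridge vals 3 d
  norm_num at c0 c1 c2 c3
  have g0 : PySem.List.pyGet? [a, b, c, d] (0 : Int) = some a := rfl
  have g1 : PySem.List.pyGet? [a, b, c, d] (1 : Int) = some b := rfl
  have g2 : PySem.List.pyGet? [a, b, c, d] (2 : Int) = some c := rfl
  have g3 : PySem.List.pyGet? [a, b, c, d] (3 : Int) = some d := rfl
  have hl : ((([a, b, c, d] : List String).length : Nat) : Int) = (4 : Int) := by simp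
  have hr : PySem.List.pyRange 0 (4 : Int) 1 = [0, 1, 2, 3] := by decide
  unfold updateA
  rw [hl, hr]
  simp only [List.foldl_cons, List.foldl_nil, List.nil_append, g0, g1, g2, g3, Option.getD_some]
  norm_num
  rw [c0, c1, c2, c3]
  exact ⟨rfl, rfl, rfl, rfl⟩

-- fold invariant: A's accumulated mapping is B's transposed columns
theorem foldA_eq (es : List String) (a b c d : String) (acc : List (List String)) :
    (es.foldl (fun (st : List String × List (List String)) e =>
        let vals := splitS e ":"
        let m := updateA st.1 vals
        (m, st.2 ++ [m])) ([a, b, c, d], acc)).2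
      = acc ++ zip4B (fillB 0 a (es.map (fun e => splitS e ":")))
                     (fillB 1 b (es.map (fun e => splitS e ":")))
                     (fillB 2 c (es.map (fun e => splitS e ":")))
                     (fillB 3 d (es.map (fun e => splitS e ":"))) := by
  induction es generalizing a b c d acc with
  | nil => simp [fillB, zip4B]
  | cons e rest ih =>
    simp only [List.foldl_cons, List.map_cons, updateA_eq, fillB, zip4B, ih,
      List.append_assoc, List.singleton_append]

theorem parseSourceMap_spec : Claim_equal_parseSourceMap := by
  intro maptext _
  unfold Spec_parseSourceMap parseSourceMap parseSourceMap_alt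
  cases maptext with
  | none => rfl
  | some s =>
    exact foldA_eq _ "" "" "" "" []
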